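-- pv_equiv track=rewrite | github.com/Galaxy13/python-scripts | temp_parts/yahtzee.py | gen_all_holds
-- ===== SOURCE A (Python) =====
-- def gen_all_sequences(outcomes, length):
--     """
--     Iterative function that enumerates the set of all sequences of
--     outcomes of given length.
--     """
--
--     answer_set = set([()])
--     for dummy_idx in range(length):
--         temp_set = set()
--         for partial_sequence in answer_set:
--             for item in outcomes:
--                 new_sequence = list(partial_sequence)
--                 new_sequence.append(item)
--                 temp_set.add(tuple(new_sequence))
--         answer_set = temp_set
--     return answer_set
--
-- def gen_all_holds(hand):
--     """
--     Generate all possible choices of dice from hand to hold.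
--
--     hand: full yahtzee hand
--
--     Returns a set of tuples, where each tuple is dice to hold
--     """
--     count_of_values = {dice: 0 for dice in hand}
--     for dice in hand:
--         count_of_values[dice] += 1
--
--     answer_set = [()]
--     for index in range(len(hand)):
--         answer_set.extend(gen_all_sequences(hand, index + 1))
--
--     temp_list = []
--     for sequence_idx, dummy_value in enumerate(answer_set):
--         answer_set[sequence_idx] = tuple(sorted(list(answer_set[sequence_idx])))
--         for element in answer_set[sequence_idx]:
--             if answer_set[sequence_idx].count(element) > count_of_values[element]:
--                 temp_list.append(answer_set[sequence_idx])
--                 break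
--             else:
--                 continue
--
--     for sequence in temp_list:
--         answer_set.remove(sequence)
--
--     return set(answer_set)
-- ===== SOURCE B (Python) =====
-- def gen_all_holds(hand):
--     """
--     Generate all possible choices of dice from hand to hold.
--
--     hand: full yahtzee hand
--
--     Returns a set of tuples, where each tuple is dice to hold
--     """
--     counts = {}
--     for die in hand:
--         counts[die] = counts.get(die, 0) + 1
--     level = [()]
--     holds = [()]
--     for _ in range(len(hand)):
--         nxt = []
--         for hold in level:
--             for value in counts:
--                 if hold.count(value) < counts[value]:
--                     new = tuple(sorted(hold + (value,)))
--                     if new not in nxt: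
--                         nxt.append(new)
--         level = nxt
--         holds.extend(nxt)
--     return set(holds)
-- ===== Notes on version B (the rewrite author's own statement) =====
-- stated objective: faster
-- what changed: Instead of enumerating every value sequence of every length (n^k per length) and then sorting, counting and deleting the invalid ones, B counts the hand once and grows the set of sorted holds level by level, extending each hold by one die only while its count allows it and deduplicating as it goes.
import Mathlib
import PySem

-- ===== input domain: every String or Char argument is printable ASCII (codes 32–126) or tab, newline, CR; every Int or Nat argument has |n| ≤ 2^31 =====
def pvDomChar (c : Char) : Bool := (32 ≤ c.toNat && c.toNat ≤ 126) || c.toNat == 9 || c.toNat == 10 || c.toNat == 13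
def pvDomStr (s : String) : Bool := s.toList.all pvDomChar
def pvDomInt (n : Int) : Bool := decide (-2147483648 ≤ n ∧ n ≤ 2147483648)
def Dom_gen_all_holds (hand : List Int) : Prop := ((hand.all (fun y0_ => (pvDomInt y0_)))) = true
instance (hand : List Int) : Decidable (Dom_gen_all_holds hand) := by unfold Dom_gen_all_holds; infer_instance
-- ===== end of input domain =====

-- B replaces A's per-length enumeration of all value sequences by a level-by-level growth of the
-- distinct sorted holds (count the hand once, extend each valid hold by one die, dedup as it goes);
-- the returned Python value is a set, and both ports list its elements in the same insertion order.

-- ===== PORT A =====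
-- gen_all_sequences: answer_set = set([()]); for _ in range(length): temp = set();
--   for ps in answer_set: for item in outcomes: temp.add(tuple(list(ps)+[item])); answer_set = temp
def genAllSequences (outcomes : List Int) (length : Int) : List (List Int) :=
  (PySem.List.pyRange 0 length 1).foldl
    (fun answer_set _ =>
      answer_set.foldl
        (fun temp_set partial_sequence =>
          outcomes.foldl
            (fun temp_set item => PySem.Set.add temp_set (partial_sequence ++ [item]))
            temp_set)
        PySem.Set.empty)
    (PySem.Set.ofList [([] : List Int)])

-- count_of_values = {dice: 0 for dice in hand}; for dice in hand: count_of_values[dice] += 1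
-- (the += always finds its key, so `modify`'s default 0 is never used)
def pyCountsA (hand : List Int) : PySem.Dict Int Int :=
  (hand.foldl (fun d dice => PySem.Dict.modify d dice 0 (· + 1))
    (hand.foldl (fun d dice => d.insert dice 0) PySem.Dict.empty))

-- answer_set = [()]; for index in range(len(hand)): answer_set.extend(gen_all_sequences(hand, index+1))
def pyAnswerA (hand : List Int) : List (List Int) :=
  (PySem.List.pyRange 0 (hand.length : Int) 1).foldl
    (fun answer_set index => answer_set ++ genAllSequences hand (index + 1)) [[]]

-- for sequence_idx, _ in enumerate(answer_set):
--   answer_set[sequence_idx] = tuple(sorted(list(answer_set[sequence_idx])))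
--   for element in answer_set[sequence_idx]:
--     if answer_set[sequence_idx].count(element) > count_of_values[element]:
--       temp_list.append(answer_set[sequence_idx]); break
-- (each step rewrites exactly index idx, the break-loop's only effect is one append iff some
--  element over-counts, and count_of_values[element] always finds its key: defaults never used)
def pySortPhase (counts : PySem.Dict Int Int) (answer : List (List Int)) :
    List (List Int) × List (List Int) :=
  (List.range answer.length).foldl
    (fun (st : List (List Int) × List (List Int)) idx =>
      let s := PySem.List.sorted (st.1.getD idx []) (fun x => x) false
      let a' := st.1.set idx s
      if s.any (fun element => decide ((PySem.List.count s element : Int) > counts.getD element 0))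
      then (a', st.2 ++ [s]) else (a', st.2))
    (answer, [])

-- for sequence in temp_list: answer_set.remove(sequence)   (always present: ValueError never raised)
def pyRemovePhase (st : List (List Int) × List (List Int)) : List (List Int) :=
  st.2.foldl (fun answer_set sequence =>
    (PySem.List.remove? answer_set sequence).getD answer_set) st.1

def gen_all_holds (hand : List Int) : List (List Int) :=
  PySem.Set.ofList (pyRemovePhase (pySortPhase (pyCountsA hand) (pyAnswerA hand)))

-- ===== PORT B =====
-- counts = {}; for die in hand: counts[die] = counts.get(die, 0) + 1
def pyCountsB (hand : List Int) : PySem.Dict Int Int :=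
  hand.foldl (fun d die => d.insert die (d.getD die 0 + 1)) PySem.Dict.empty

-- nxt = []
-- for hold in level:
--   for value in counts:
--     if hold.count(value) < counts[value]:
--       new = tuple(sorted(hold + (value,)))
--       if new not in nxt: nxt.append(new)
def pyLevelStep (counts : PySem.Dict Int Int) (level : List (List Int)) : List (List Int) :=
  level.foldl
    (fun nxt hold =>
      counts.keys.foldl
        (fun nxt value =>
          if (PySem.List.count hold value : Int) < counts.getD value 0 then
            let nw := PySem.List.sorted (hold ++ [value]) (fun x => x) false
            if nw ∈ nxt then nxt else nxt ++ [nw]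
          else nxt)
        nxt)
    []

-- level = [()]; holds = [()]
-- for _ in range(len(hand)): nxt = <pyLevelStep>; level = nxt; holds.extend(nxt)
-- return set(holds)
def gen_all_holds_alt (hand : List Int) : List (List Int) :=
  PySem.Set.ofList
    ((List.range hand.length).foldl
      (fun (st : List (List Int) × List (List Int)) _ =>
        let nxt := pyLevelStep (pyCountsB hand) st.1
        (nxt, st.2 ++ nxt))
      ([[]], [[]])).2

-- ===== PRECONDITION & SPEC =====
def Spec_gen_all_holds (hand : List Int) (out : List (List Int)) : Prop := out = gen_all_holds_alt hand
instance (hand : List Int) (out : List (List Int)) : Decidable (Spec_gen_all_holds hand out) := by unfold Spec_gen_all_holds; infer_instance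

-- ===== CLAIM (what is proved, stated in full; the proofs are below) =====
def Claim_equal_gen_all_holds : Prop := ∀ (hand : List Int), Dom_gen_all_holds hand → Spec_gen_all_holds hand (gen_all_holds hand)

-- ===== LEMMAS AND PROOFS =====

-- proof-side canonical description: the distinct sorted valid holds, grown level by level
def pvSid (t : List Int) : List Int := PySem.List.sorted t (fun x => x) false
def pvExt (t : List Int) (v : Int) : List Int := pvSid (t ++ [v])
def pvGood (hand t : List Int) : Bool :=
  t.all (fun e => decide ((List.count e t : Int) ≤ (List.count e hand : Int)))
def pvSeqs (D : List Int) : Nat → List (List Int)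
  | 0 => [[]]
  | k+1 => (pvSeqs D k).flatMap (fun p => D.map (fun v => p ++ [v]))
def pvBlk (hand : List Int) (t : List Int) : List (List Int) :=
  (PySem.List.dedup hand).map (fun v => pvExt t v)
def pvLvl (hand : List Int) : Nat → List (List Int)
  | 0 => [[]]
  | k+1 => PySem.Set.ofList (((pvLvl hand k).flatMap (pvBlk hand)).filter (pvGood hand))
def pvCanon (hand : List Int) : List (List Int) :=
  [[]] ++ (List.range hand.length).flatMap (fun k => pvLvl hand (k+1))

-- ---- generic set-order lemmas ----
theorem pvOfListMapInj {f : Int → List Int} (hf : Function.Injective f) (l : List Int) :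
    PySem.Set.ofList (l.map f) = (PySem.List.dedup l).map f := by
  induction l using List.reverseRecOn with
  | nil => rfl
  | append_singleton l x ih =>
    rw [List.map_append, List.map_singleton, PySem.Set.ofList_append_singleton,
        PySem.List.dedup_eq_ofList, PySem.Set.ofList_append_singleton]
    by_cases hx : x ∈ l
    · rw [PySem.Set.add_of_mem (by simpa [PySem.Set.mem_ofList] using List.mem_map_of_mem hx),
          PySem.Set.add_of_mem (by simpa [PySem.Set.mem_ofList] using hx), ih,
          PySem.List.dedup_eq_ofList]
    · rw [PySem.Set.add_of_not_mem (by
          simp only [PySem.Set.mem_ofList, List.mem_map]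
          rintro ⟨a, ha, hfa⟩; exact hx (hf hfa ▸ ha)),
          PySem.Set.add_of_not_mem (by simpa [PySem.Set.mem_ofList] using hx), ih,
          PySem.List.dedup_eq_ofList, List.map_append, List.map_singleton]

theorem pvUpdateOfForallMem (s : PySem.Set (List Int)) (ys : List (List Int))
    (h : ∀ y ∈ ys, y ∈ s) : PySem.Set.update s ys = s := by
  rw [PySem.Set.update_eq_append_filter]
  have hnil : List.filter (fun y => !s.contains y) (PySem.Set.ofList ys) = [] := by
    apply List.filter_eq_nil_iff.mpr
    intro y hy
    simp only [Bool.not_eq_true', Bool.not_eq_false]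
    exact (PySem.Set.contains_iff s y).mpr (h y ((PySem.Set.mem_ofList ys y).mp hy))
  rw [hnil, List.append_nil]

theorem pvOfListAppendDisjoint (xs ys : List (List Int))
    (h : ∀ x ∈ ys, x ∉ xs) :
    PySem.Set.ofList (xs ++ ys) = PySem.Set.ofList xs ++ PySem.Set.ofList ys := by
  rw [PySem.Set.ofList_append, PySem.Set.update_eq_append_filter]
  congr 1
  apply List.filter_eq_self.mpr
  intro y hy
  have hyy : y ∉ xs := h y ((PySem.Set.mem_ofList ys y).mp hy)
  simpa using hyy

theorem pvOfListFilter (p : List Int → Bool) (l : List (List Int)) :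
    PySem.Set.ofList (l.filter p) = (PySem.Set.ofList l).filter p := by
  induction l using List.reverseRecOn with
  | nil => rfl
  | append_singleton l x ih =>
    rw [List.filter_append, PySem.Set.ofList_append_singleton]
    cases hp : p x with
    | true =>
      simp only [List.filter_singleton, hp, cond_true]
      rw [PySem.Set.ofList_append_singleton]
      by_cases hx : x ∈ l
      · rw [PySem.Set.add_of_mem (by simpa [PySem.Set.mem_ofList, List.mem_filter] using ⟨hx, hp⟩),
            PySem.Set.add_of_mem (by simpa [PySem.Set.mem_ofList] using hx), ih]
      · rw [PySem.Set.add_of_not_mem (by simp [PySem.Set.mem_ofList, List.mem_filter, hx]),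
            PySem.Set.add_of_not_mem (by simpa [PySem.Set.mem_ofList] using hx), ih,
            List.filter_append, List.filter_singleton]
        simp [hp]
    | false =>
      simp only [List.filter_singleton, hp, cond_false, List.append_nil]
      by_cases hx : x ∈ l
      · rw [PySem.Set.add_of_mem (by simpa [PySem.Set.mem_ofList] using hx), ih]
      · rw [PySem.Set.add_of_not_mem (by simpa [PySem.Set.mem_ofList] using hx), ih,
            List.filter_append, List.filter_singleton]
        simp [hp]

theorem pvOfListFlatMapDedup (g : List Int → List (List Int)) (l : List (List Int)) :
    PySem.Set.ofList (l.flatMap g) = PySem.Set.ofList ((PySem.List.dedup l).flatMap g) := by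
  induction l using List.reverseRecOn with
  | nil => rfl
  | append_singleton l x ih =>
    rw [List.flatMap_append, List.flatMap_singleton, PySem.Set.ofList_append, ih,
        PySem.List.dedup_eq_ofList, PySem.List.dedup_eq_ofList,
        PySem.Set.ofList_append_singleton]
    by_cases hx : x ∈ l
    · rw [PySem.Set.add_of_mem (by simpa [PySem.Set.mem_ofList] using hx)]
      apply pvUpdateOfForallMem
      intro y hy
      rw [PySem.Set.mem_ofList]
      exact List.mem_flatMap.mpr ⟨x, by rwa [PySem.Set.mem_ofList], hy⟩
    · rw [PySem.Set.add_of_not_mem (by simpa [PySem.Set.mem_ofList] using hx),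
          List.flatMap_append, List.flatMap_singleton, PySem.Set.ofList_append]

theorem pvFlatMapFilterNil (l : List (List Int)) (q : List Int → Bool)
    (h : List Int → List (List Int)) (hq : ∀ t ∈ l, q t = false → h t = []) :
    l.flatMap h = (l.filter q).flatMap h := by
  induction l with
  | nil => rfl
  | cons x t ih =>
    have ih' := ih (fun a ha hqa => hq a (List.mem_cons_of_mem x ha) hqa)
    rw [List.flatMap_cons, List.filter_cons]
    by_cases hx : q x = true
    · rw [if_pos hx, List.flatMap_cons, ih']
    · rw [if_neg hx, hq x List.mem_cons_self (by simpa using hx), List.nil_append, ih']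

theorem pvFoldlUpdate (F : List Int → List (List Int)) (l : List (List Int))
    (s : PySem.Set (List Int)) :
    l.foldl (fun s x => PySem.Set.update s (F x)) s = PySem.Set.update s (l.flatMap F) := by
  induction l generalizing s with
  | nil => simp [PySem.Set.update]
  | cons x t ih =>
    rw [List.foldl_cons, ih, List.flatMap_cons, PySem.Set.update_append]

-- ---- facts about the canonical pieces ----
theorem pvSidNil : pvSid [] = [] := by rfl

theorem pvSidPerm (t : List Int) : (pvSid t).Perm t := PySem.List.sorted_perm t (fun x => x) false

theorem pvSidAppend (p : List Int) (v : Int) : pvSid (p ++ [v]) = pvExt (pvSid p) v := by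
  unfold pvExt
  exact PySem.List.sorted_eq_sorted_of_perm _ _ _ (fun a b h => h)
    (((pvSidPerm p).append_right [v]).symm)

theorem pvGoodNil (hand : List Int) : pvGood hand [] = true := by rfl

theorem pvGoodExt (hand t : List Int) (v : Int)
    (h : pvGood hand (pvExt t v) = true) : pvGood hand t = true := by
  simp only [pvGood, List.all_eq_true, decide_eq_true_eq] at h ⊢
  intro e he
  have hme : e ∈ pvExt t v := by
    unfold pvExt pvSid
    rw [PySem.List.mem_sorted]
    exact List.mem_append_left _ he
  have hcnt : List.count e (pvExt t v) = List.count e t + List.count e [v] := by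
    simp only [pvExt]
    rw [List.Perm.count (pvSidPerm (t ++ [v])) e, List.count_append]
  have := h e hme
  rw [hcnt] at this
  push_cast at this ⊢
  omega

theorem pvGoodExtIff (hand t : List Int) (v : Int) (ht : pvGood hand t = true) :
    pvGood hand (pvExt t v)
      = decide ((List.count v t : Int) < (List.count v hand : Int)) := by
  have hcnt : ∀ e, List.count e (pvExt t v) = List.count e t + List.count e [v] := by
    intro e
    simp only [pvExt]
    rw [List.Perm.count (pvSidPerm (t ++ [v])) e, List.count_append]
  have hmem : ∀ e, e ∈ pvExt t v ↔ (e ∈ t ∨ e = v) := by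
    intro e
    simp only [pvExt, pvSid]
    rw [PySem.List.mem_sorted]
    simp
  rw [Bool.eq_iff_iff, decide_eq_true_eq]
  simp only [pvGood, List.all_eq_true, decide_eq_true_eq] at ht ⊢
  constructor
  · intro h
    have hv := h v ((hmem v).mpr (Or.inr rfl))
    rw [hcnt v] at hv
    simp at hv
    omega
  · intro hlt e he
    rw [hcnt e]
    by_cases hev : e = v
    · subst hev
      rw [List.count_singleton', if_pos rfl]
      push_cast at hlt ⊢
      omega
    · have het : e ∈ t := by
        rcases (hmem e).mp he with h' | h'
        · exact h'
        · exact absurd h' hev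
      have h0 : List.count e [v] = 0 := by
        rw [List.count_singleton', if_neg (fun h => hev h.symm)]
      rw [h0]
      have := ht e het
      push_cast at this ⊢
      omega

theorem pvLenSeqs (D : List Int) (k : Nat) : ∀ p ∈ pvSeqs D k, p.length = k := by
  induction k with
  | zero => intro p hp; simp [pvSeqs] at hp; simp [hp]
  | succ k ih =>
    intro p hp
    simp only [pvSeqs, List.mem_flatMap, List.mem_map] at hp
    obtain ⟨q, hq, v, _, rfl⟩ := hp
    simp [ih q hq]

theorem pvNodupSeqs (D : List Int) (hD : D.Nodup) (k : Nat) : (pvSeqs D k).Nodup := by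
  induction k with
  | zero => simp [pvSeqs]
  | succ k ih =>
    rw [pvSeqs, List.nodup_flatMap]
    constructor
    · intro p _
      exact (List.nodup_map_iff_inj_on hD).mpr
        (fun x _ y _ h => by simpa using List.append_inj_right h rfl)
    · refine List.Pairwise.imp_of_mem ?_ ih
      intro p q hp hq hne
      refine List.disjoint_left.mpr ?_
      intro a ha hb
      simp only [List.mem_map] at ha hb
      obtain ⟨v, _, rfl⟩ := ha
      obtain ⟨w, _, hw⟩ := hb
      have hlen : p.length = q.length := (pvLenSeqs D k p hp).trans (pvLenSeqs D k q hq).symm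
      exact hne (List.append_inj hw.symm hlen).1

theorem pvLenLvl (hand : List Int) (k : Nat) : ∀ t ∈ pvLvl hand k, t.length = k := by
  induction k with
  | zero => intro t ht; simp [pvLvl] at ht; simp [ht]
  | succ k ih =>
    intro t ht
    rw [pvLvl, PySem.Set.mem_ofList, List.mem_filter] at ht
    obtain ⟨hmem, -⟩ := ht
    rw [List.mem_flatMap] at hmem
    obtain ⟨q, hq, ht⟩ := hmem
    simp only [pvBlk, List.mem_map] at ht
    obtain ⟨v, -, rfl⟩ := ht
    simp only [pvExt, pvSid]
    rw [PySem.List.length_sorted, List.length_append, ih q hq]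
    rfl

theorem pvGoodLvl (hand : List Int) (k : Nat) : ∀ t ∈ pvLvl hand k, pvGood hand t = true := by
  cases k with
  | zero => intro t ht; simp [pvLvl] at ht; simp [ht, pvGoodNil]
  | succ k =>
    intro t ht
    rw [pvLvl, PySem.Set.mem_ofList, List.mem_filter] at ht
    exact ht.2

theorem pvNodupLvl (hand : List Int) (k : Nat) : (pvLvl hand k).Nodup := by
  cases k with
  | zero => simp [pvLvl]
  | succ k => exact PySem.Set.nodup_ofList _

theorem pvNodupCanon (hand : List Int) : (pvCanon hand).Nodup := by
  rw [pvCanon, List.nodup_append]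
  refine ⟨by simp, ?_, ?_⟩
  · rw [List.nodup_flatMap]
    refine ⟨fun k _ => pvNodupLvl hand (k+1), ?_⟩
    refine List.Pairwise.imp_of_mem ?_ List.pairwise_lt_range
    intro a b _ _ hab
    refine List.disjoint_left.mpr ?_
    intro t hta htb
    have h1 := pvLenLvl hand (a+1) t hta
    have h2 := pvLenLvl hand (b+1) t htb
    omega
  · intro a ha b hb
    simp only [List.mem_singleton] at ha
    subst ha
    rw [List.mem_flatMap] at hb
    obtain ⟨k, -, hkb⟩ := hb
    have := pvLenLvl hand (k+1) b hkb
    intro h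
    rw [← h] at this
    simp at this

-- map pvSid over the length-(k+1) sequences, deduplicated and filtered, is level k+1
theorem pvMapSidSeqsSucc (hand : List Int) (k : Nat) :
    (pvSeqs (PySem.List.dedup hand) (k+1)).map pvSid
      = ((pvSeqs (PySem.List.dedup hand) k).map pvSid).flatMap (pvBlk hand) := by
  rw [pvSeqs, List.map_flatMap, List.flatMap_map]
  apply List.flatMap_congr
  intro p _
  rw [List.map_map]
  apply List.map_congr_left
  intro v _
  exact pvSidAppend p v

theorem pvLvlEq (hand : List Int) (k : Nat) :
    ((PySem.Set.ofList ((pvSeqs (PySem.List.dedup hand) k).map pvSid)).filter (pvGood hand))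
      = pvLvl hand k := by
  induction k with
  | zero =>
    rw [pvLvl]
    show ((PySem.Set.ofList ([[]].map pvSid)).filter (pvGood hand)) = [[]]
    rw [List.map_singleton, pvSidNil,
        PySem.Set.ofList_eq_self_of_nodup _ (by simp), List.filter_singleton]
    simp [pvGoodNil]
  | succ k ih =>
    rw [pvMapSidSeqsSucc, pvOfListFlatMapDedup, PySem.List.dedup_eq_ofList,
        ← pvOfListFilter, List.filter_flatMap,
        pvFlatMapFilterNil _ (pvGood hand) _ (by
          intro t _ hgf
          rw [List.filter_eq_nil_iff]
          intro x hx
          simp only [pvBlk, List.mem_map] at hx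
          obtain ⟨v, -, rfl⟩ := hx
          intro hgx
          rw [pvGoodExt hand t v hgx] at hgf
          cases hgf),
        ih, ← List.filter_flatMap, pvLvl]

-- ---- A-side lemmas ----
theorem pvZeroInit (l : List Int) : ∀ (d : PySem.Dict Int Int) (e : Int),
    d.getD e 0 = 0 → (l.foldl (fun d dice => d.insert dice 0) d).getD e 0 = 0 := by
  induction l with
  | nil => intro d e h; exact h
  | cons x t ih =>
    intro d e h
    rw [List.foldl_cons]
    apply ih
    by_cases hx : e = x
    · subst hx; rw [PySem.Dict.getD_insert_self]
    · rw [PySem.Dict.getD_insert_of_ne _ _ _ hx]; exact h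

theorem pvCountsAGetD (hand : List Int) (e : Int) :
    (pyCountsA hand).getD e 0 = (List.count e hand : Int) := by
  unfold pyCountsA
  rw [PySem.Dict.getD_foldl_modify_add_one]
  rw [pvZeroInit hand PySem.Dict.empty e (by rfl)]
  simp

theorem pvInnerStep (hand : List Int) : ∀ (ans : List (List Int)) (t : List (List Int)),
    ans.Nodup →
    (∀ p ∈ ans, ∀ x ∈ t, x ∉ (PySem.List.dedup hand).map (fun v => p ++ [v])) →
    ans.foldl (fun temp ps => hand.foldl
        (fun temp item => PySem.Set.add temp (ps ++ [item])) temp) t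
      = t ++ ans.flatMap (fun p => (PySem.List.dedup hand).map (fun v => p ++ [v])) := by
  intro ans
  induction ans with
  | nil => intro t _ _; simp
  | cons ps rest ih =>
    intro t hnd hdisj
    rw [List.foldl_cons]
    have hinner : hand.foldl (fun temp item => PySem.Set.add temp (ps ++ [item])) t
        = t ++ (PySem.List.dedup hand).map (fun v => ps ++ [v]) := by
      rw [← PySem.Set.update_map_eq_foldl_add, PySem.Set.update_eq_append_filter,
          pvOfListMapInj (fun a b h => by simpa using h)]
      congr 1
      apply List.filter_eq_self.mpr
      intro y hy
      have : y ∉ t := fun hyt =>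
        hdisj ps List.mem_cons_self y hyt (by
          simpa [PySem.List.dedup_eq_ofList] using hy)
      simp only [Bool.not_eq_true', ← Bool.not_eq_true, PySem.Set.contains_iff]
      simpa using this
    rw [hinner, ih _ (List.Nodup.of_cons hnd) ?_, List.flatMap_cons, List.append_assoc]
    intro p hp x hx
    rcases List.mem_append.mp hx with hxt | hxb
    · exact hdisj p (List.mem_cons_of_mem ps hp) x hxt
    · simp only [List.mem_map] at hxb ⊢
      obtain ⟨v, -, rfl⟩ := hxb
      rintro ⟨w, -, hw⟩
      have : p = ps := (List.append_inj' hw rfl).1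
      subst this
      exact (List.nodup_cons.mp hnd).1 hp

theorem pvGenAllSequencesEq (hand : List Int) (k : Nat) :
    genAllSequences hand (k : Int) = pvSeqs (PySem.List.dedup hand) k := by
  induction k with
  | zero =>
    unfold genAllSequences
    rw [PySem.List.pyRange_one_eq_nil (by simp)]
    rw [List.foldl_nil, pvSeqs, PySem.Set.ofList_eq_self_of_nodup _ (by simp)]
  | succ k ih =>
    unfold genAllSequences at ih ⊢
    have hc : ((k+1 : Nat) : Int) = (k : Int) + 1 := by push_cast; ring
    rw [hc, PySem.List.pyRange_one_succ_right (by positivity), List.foldl_append, ih,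
        List.foldl_cons, List.foldl_nil]
    rw [pvInnerStep hand (pvSeqs (PySem.List.dedup hand) k) PySem.Set.empty
          (pvNodupSeqs _ (PySem.List.nodup_dedup hand) k) (by intro p _ x hx; cases hx),
        pvSeqs]
    rfl

theorem pvAnswerAEq (hand : List Int) :
    pyAnswerA hand
      = [[]] ++ (List.range hand.length).flatMap
          (fun k => pvSeqs (PySem.List.dedup hand) (k+1)) := by
  unfold pyAnswerA
  rw [PySem.List.foldl_append_eq_flatMap]
  congr 1
  rw [PySem.List.pyRange_one, List.flatMap_map]
  simp only [Int.sub_zero, Int.toNat_natCast]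
  apply List.flatMap_congr
  intro k _
  have hc : (0 : Int) + (k : Int) + 1 = ((k+1 : Nat) : Int) := by push_cast; ring
  rw [hc, pvGenAllSequencesEq]

theorem pvSortPhaseEq (counts : PySem.Dict Int Int) :
    ∀ (post pre acc : List (List Int)),
    (List.range' pre.length post.length).foldl
      (fun (st : List (List Int) × List (List Int)) idx =>
        let s := PySem.List.sorted (st.1.getD idx []) (fun x => x) false
        let a' := st.1.set idx s
        if s.any (fun element => decide ((PySem.List.count s element : Int) > counts.getD element 0))
        then (a', st.2 ++ [s]) else (a', st.2))
      (pre ++ post, acc)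
    = (pre ++ post.map pvSid,
       acc ++ (post.map pvSid).filter
         (fun s => s.any (fun element =>
            decide ((PySem.List.count s element : Int) > counts.getD element 0)))) := by
  intro post
  induction post with
  | nil => intro pre acc; simp
  | cons x rest ih =>
    intro pre acc
    rw [List.length_cons, List.range'_succ, List.foldl_cons]
    have hget : (pre ++ x :: rest).getD pre.length [] = x := by
      rw [List.getD_eq_getElem?_getD, List.getElem?_append_right (le_refl _)]
      simp
    have hset : ∀ v, (pre ++ x :: rest).set pre.length v = pre ++ v :: rest := by
      intro v; rw [List.set_append]; simp
    dsimp only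
    rw [hget, hset]
    have hpre : pre ++ (PySem.List.sorted x (fun x => x) false) :: rest
        = (pre ++ [pvSid x]) ++ rest := by simp only [pvSid, List.append_assoc,
          List.singleton_append]
    have hlen : pre.length + 1 = (pre ++ [pvSid x]).length := by simp
    rw [List.map_cons, List.filter_cons]
    by_cases hb : ((PySem.List.sorted x (fun x => x) false).any
        (fun element => decide ((PySem.List.count (PySem.List.sorted x (fun x => x) false) element : Int) > counts.getD element 0))) = true
    case pos =>
      have hb' : ((pvSid x).any
          (fun element => decide ((PySem.List.count (pvSid x) element : Int) > counts.getD element 0))) = true := hb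
      rw [if_pos hb, if_pos hb', hpre, hlen, ih]
      rw [List.append_assoc, List.singleton_append, List.append_assoc, List.singleton_append]
      rfl
    case neg =>
      have hb' : ¬ ((pvSid x).any
          (fun element => decide ((PySem.List.count (pvSid x) element : Int) > counts.getD element 0))) = true := hb
      rw [if_neg hb, if_neg hb', hpre, hlen, ih]
      rw [List.append_assoc, List.singleton_append]

theorem pvFoldlRemoveCons (x : List Int) (r : List (List Int)) :
    ∀ (t : List (List Int)), (∀ v ∈ t, v ≠ x) →
    t.foldl (fun a s => (PySem.List.remove? a s).getD a) (x :: r)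
      = x :: t.foldl (fun a s => (PySem.List.remove? a s).getD a) r := by
  intro t
  induction t generalizing r with
  | nil => intro _; rfl
  | cons v tl ih =>
    intro h
    rw [List.foldl_cons, List.foldl_cons,
        PySem.List.remove?_cons_of_ne r (fun hxv => (h v List.mem_cons_self) hxv.symm)]
    cases hr : PySem.List.remove? r v with
    | none => simp only [Option.map_none, Option.getD_none]
              exact ih r (fun w hw => h w (List.mem_cons_of_mem v hw))
    | some r' => simp only [Option.map_some, Option.getD_some]
                 exact ih r' (fun w hw => h w (List.mem_cons_of_mem v hw))

theorem pvRemoveAll (p : List Int → Bool) : ∀ (M : List (List Int)),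
    (M.filter p).foldl (fun a s => (PySem.List.remove? a s).getD a) M
      = M.filter (fun s => !(p s)) := by
  intro M
  induction M with
  | nil => rfl
  | cons x r ih =>
    rw [List.filter_cons, List.filter_cons]
    cases hp : p x with
    | true =>
      rw [if_pos rfl, List.foldl_cons]
      show (List.filter p r).foldl (fun a s => (PySem.List.remove? a s).getD a)
          ((PySem.List.remove? (x :: r) x).getD (x :: r)) = _
      rw [PySem.List.remove?_cons_self, Option.getD_some, ih]
      simp
    | false =>
      rw [if_neg Bool.false_ne_true, if_pos (show (!false) = true from rfl)]
      rw [pvFoldlRemoveCons x r (List.filter p r) (fun v hv hvx => by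
        have := List.of_mem_filter hv
        rw [hvx, hp] at this
        cases this), ih]

theorem pvOfListBlocks (F : Nat → List (List Int))
    (hF : ∀ k, ∀ x ∈ F k, x.length = k+1) (n : Nat) :
    PySem.Set.ofList ([[]] ++ (List.range n).flatMap F)
      = [[]] ++ (List.range n).flatMap (fun k => PySem.Set.ofList (F k)) := by
  induction n with
  | zero =>
    simp only [List.range_zero, List.flatMap_nil, List.append_nil]
    exact PySem.Set.ofList_eq_self_of_nodup _ (by simp)
  | succ n ih =>
    rw [List.range_succ, List.flatMap_append, List.flatMap_singleton, ← List.append_assoc,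
        pvOfListAppendDisjoint _ _ ?_, ih, List.append_assoc]
    · congr 2
      rw [List.flatMap_append, List.flatMap_singleton]
    · intro x hx
      have hxl := hF n x hx
      rw [List.mem_append]
      rintro (h1 | h2)
      · simp only [List.mem_singleton] at h1
        rw [h1] at hxl; simp at hxl
      · rw [List.mem_flatMap] at h2
        obtain ⟨k, hk, hxk⟩ := h2
        have := hF k x hxk
        rw [List.mem_range] at hk
        omega

theorem pvBadA (hand : List Int) :
    (fun s => s.any (fun element =>
        decide ((PySem.List.count s element : Int) > (pyCountsA hand).getD element 0)))
      = (fun s => !pvGood hand s) := by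
  funext s
  rw [pvGood, List.not_all_eq_any_not]
  apply PySem.List.any_congr_mem
  intro e _
  rw [PySem.List.count_eq, pvCountsAGetD, ← decide_not]
  exact decide_eq_decide.mpr (Iff.symm not_le)

theorem pvAEqCanon (hand : List Int) : gen_all_holds hand = pvCanon hand := by
  unfold gen_all_holds
  have hsort : pySortPhase (pyCountsA hand) (pyAnswerA hand)
      = ((pyAnswerA hand).map pvSid,
         ((pyAnswerA hand).map pvSid).filter (fun s => !pvGood hand s)) := by
    unfold pySortPhase
    have h := pvSortPhaseEq (pyCountsA hand) (pyAnswerA hand) ([] : List (List Int)) []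
    simp only [List.length_nil, List.nil_append] at h
    rw [List.range_eq_range', h, pvBadA hand]
  rw [hsort]
  unfold pyRemovePhase
  dsimp only
  rw [pvRemoveAll (fun s => !pvGood hand s)]
  have hnn : (fun s => !!pvGood hand s) = (fun s => pvGood hand s) := by
    funext s; rw [Bool.not_not]
  rw [hnn]
  rw [pvAnswerAEq, List.map_append, List.map_flatMap, List.map_singleton, pvSidNil,
      List.filter_append, List.filter_singleton]
  rw [pvGoodNil hand, cond_true, List.filter_flatMap]
  rw [pvOfListBlocks _ ?_ hand.length]
  · rw [pvCanon]
    congr 1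
    apply List.flatMap_congr
    intro k _
    rw [pvOfListFilter, pvLvlEq]
  · intro k x hx
    rw [List.mem_filter] at hx
    obtain ⟨hx, -⟩ := hx
    rw [List.mem_map] at hx
    obtain ⟨p, hp, rfl⟩ := hx
    rw [pvSid, PySem.List.length_sorted]
    exact pvLenSeqs _ (k+1) p hp

-- ---- B-side lemmas ----
theorem pvCountsBGetD (hand : List Int) (v : Int) :
    (pyCountsB hand).getD v 0 = (List.count v hand : Int) := by
  unfold pyCountsB
  rw [PySem.Dict.getD_foldl_insert_add_one]
  simp [PySem.Dict.empty, PySem.Dict.getD, PySem.Dict.get?]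

theorem pvCountsBKeys (hand : List Int) : (pyCountsB hand).keys = PySem.List.dedup hand := by
  unfold pyCountsB
  rw [PySem.Dict.keys_foldl_insert, PySem.List.dedup_eq_ofList, ← PySem.Set.update_nil_left]
  rfl

theorem pvLevelStepEq (hand : List Int) (level : List (List Int))
    (hgood : ∀ t ∈ level, pvGood hand t = true) :
    pyLevelStep (pyCountsB hand) level
      = PySem.Set.ofList ((level.flatMap (pvBlk hand)).filter (pvGood hand)) := by
  unfold pyLevelStep
  have hinner : (fun (nxt : List (List Int)) (hold : List Int) =>
      (pyCountsB hand).keys.foldl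
        (fun nxt value =>
          if (PySem.List.count hold value : Int) < (pyCountsB hand).getD value 0 then
            let nw := PySem.List.sorted (hold ++ [value]) (fun x => x) false
            if nw ∈ nxt then nxt else nxt ++ [nw]
          else nxt) nxt)
      = (fun nxt hold => PySem.Set.update nxt
          (((PySem.List.dedup hand).filter
              (fun v => decide ((List.count v hold : Int) < (List.count v hand : Int)))).map
            (fun v => pvExt hold v))) := by
    funext nxt hold
    have hstep : (fun (nxt : List (List Int)) (value : Int) =>
        if (PySem.List.count hold value : Int) < (pyCountsB hand).getD value 0 then
          let nw := PySem.List.sorted (hold ++ [value]) (fun x => x) false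
          if nw ∈ nxt then nxt else nxt ++ [nw]
        else nxt)
        = (fun nxt value =>
            if (decide ((List.count value hold : Int) < (List.count value hand : Int))) = true
            then PySem.Set.add nxt (pvExt hold value) else nxt) := by
      funext nxt value
      rw [pvCountsBGetD, PySem.List.count_eq, PySem.Set.add_eq_ite]
      dsimp only
      simp only [decide_eq_true_eq]
      rfl
    rw [hstep, ← List.foldl_filter, ← PySem.Set.update_map_eq_foldl_add, pvCountsBKeys]
  rw [hinner, pvFoldlUpdate, PySem.Set.update_nil_left]
  congr 1
  rw [List.filter_flatMap]
  apply List.flatMap_congr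
  intro hold hmem
  rw [pvBlk, List.filter_map]
  congr 1
  apply List.filter_congr
  intro v _
  rw [Function.comp_apply]
  exact (pvGoodExtIff hand hold v (hgood hold hmem)).symm

theorem pvGrowB (hand : List Int) (n : Nat) :
    (List.range n).foldl
      (fun (st : List (List Int) × List (List Int)) _ =>
        let nxt := pyLevelStep (pyCountsB hand) st.1
        (nxt, st.2 ++ nxt))
      ([[]], [[]])
    = (pvLvl hand n, [[]] ++ (List.range n).flatMap (fun k => pvLvl hand (k+1))) := by
  induction n with
  | zero => simp [pvLvl]
  | succ n ih =>
    rw [List.range_succ, List.foldl_append, ih, List.foldl_cons, List.foldl_nil]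
    dsimp only
    rw [pvLevelStepEq hand (pvLvl hand n) (pvGoodLvl hand n),
        List.flatMap_append, List.flatMap_singleton, ← List.append_assoc]
    have hstep : PySem.Set.ofList
        (((pvLvl hand n).flatMap (pvBlk hand)).filter (pvGood hand)) = pvLvl hand (n+1) := rfl
    rw [hstep]

theorem pvBEqCanon (hand : List Int) : gen_all_holds_alt hand = pvCanon hand := by
  unfold gen_all_holds_alt
  rw [pvGrowB]
  show PySem.Set.ofList (pvCanon hand) = pvCanon hand
  exact PySem.Set.ofList_eq_self_of_nodup _ (pvNodupCanon hand)

-- ===== VERDICT (by name: the statement is the Claim_ definition above) =====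
theorem gen_all_holds_spec : Claim_equal_gen_all_holds := by
  intro hand _
  unfold Spec_gen_all_holds
  rw [pvAEqCanon, pvBEqCanon]
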